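-- pv_equiv track=rewrite | github.com/AyoItsYas/ieee-xtreme-18-solutions | laser-defense.py | count_shapes
-- ===== SOURCE A (Python) =====
-- def transform_A_sequence(inputs, L):
--     entries = []
--
--     for direction, number in inputs:
--         if direction == "U":
--             entries.append((direction, L + number))
--         elif direction == "R":
--             entries.append((direction, L + (2 * L - number)))
--
--     return sorted(set(entries), key=lambda x: x[1])
--
-- def transform_B_sequence(inputs, L):
--     entries = []
--
--     for direction, number in inputs:
--         if direction == "L":
--             entries.append((direction, number))
--         elif direction == "U":
--             entries.append((direction, number + L))
--
--     return sorted(set(entries), key=lambda x: x[1])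
--
-- def count_shapes(L, A, B):
--     A = transform_A_sequence(A, L)
--     B = transform_B_sequence(B, L)
--
--     shapes = 1 + len(B)
--     intersections = 0
--     b_index = 0
--     b_length = len(B)
--
--     for direction_A, position_A in A:
--         while b_index < b_length and position_A > B[b_index][1]:
--             intersections += 1
--             b_index += 1
--
--         shapes += 1 + intersections
--
--     return shapes
-- ===== SOURCE B (Python) =====
-- def count_shapes(L, A, B):
--     a_entries = {(d, L + n) if d == "U" else (d, 3 * L - n) for d, n in A if d in ("U", "R")}
--     b_entries = {(d, n) if d == "L" else (d, n + L) for d, n in B if d in ("L", "U")}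
--     crossings = sum(1 for _, p in a_entries for _, q in b_entries if q < p)
--     return 1 + len(a_entries) + len(b_entries) + crossings
-- ===== Notes on version B (the rewrite author's own statement) =====
-- stated objective: alternative
-- what changed: Replaces the sort-both-lists + two-pointer sweep accumulation with a closed form: dedup both transformed entry sets (no sorting at all) and return 1 + |A'| + |B'| + the number of pairs (a,b) with b's position strictly below a's, counted directly.
import Mathlib
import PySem

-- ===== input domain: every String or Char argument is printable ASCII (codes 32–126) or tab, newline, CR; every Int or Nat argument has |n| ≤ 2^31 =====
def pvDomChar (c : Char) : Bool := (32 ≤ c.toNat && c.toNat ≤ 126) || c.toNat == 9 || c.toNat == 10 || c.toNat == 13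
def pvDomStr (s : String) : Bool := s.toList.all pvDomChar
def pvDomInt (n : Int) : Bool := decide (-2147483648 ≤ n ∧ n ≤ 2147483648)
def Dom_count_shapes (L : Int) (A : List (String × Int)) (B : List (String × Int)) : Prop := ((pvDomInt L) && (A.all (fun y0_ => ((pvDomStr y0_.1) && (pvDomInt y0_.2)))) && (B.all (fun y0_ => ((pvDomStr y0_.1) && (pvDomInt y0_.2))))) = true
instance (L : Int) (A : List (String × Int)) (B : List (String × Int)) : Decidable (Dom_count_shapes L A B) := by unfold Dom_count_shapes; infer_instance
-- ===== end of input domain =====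

-- B replaces A's sort-both-lists + two-pointer sweep by a closed form over the deduplicated
-- entry sets (no sorting): 1 + |A'| + |B'| + #{(a,b) | b's position < a's position}. Objective: alternative.

-- ===== PORT A =====
def transform_A_sequence (inputs : List (String × Int)) (L : Int) : List (String × Int) :=
  let entries := inputs.foldl (fun entries x =>
    if x.1 == "U" then entries ++ [(x.1, L + x.2)]
    else if x.1 == "R" then entries ++ [(x.1, L + (2 * L - x.2))]
    else entries) ([] : List (String × Int))
  PySem.List.sorted (PySem.Set.ofList entries) (fun x => x.2) false

def transform_B_sequence (inputs : List (String × Int)) (L : Int) : List (String × Int) :=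
  let entries := inputs.foldl (fun entries x =>
    if x.1 == "L" then entries ++ [(x.1, x.2)]
    else if x.1 == "U" then entries ++ [(x.1, x.2 + L)]
    else entries) ([] : List (String × Int))
  PySem.List.sorted (PySem.Set.ofList entries) (fun x => x.2) false

-- the inner 'while b_index < b_length and position_A > B[b_index][1]' loop of A
def csAdvance (Bs : List (String × Int)) (p : Int) (inter bidx : Nat) : Nat × Nat :=
  if h : bidx < Bs.length then
    if p > (Bs[bidx]).2 then csAdvance Bs p (inter + 1) (bidx + 1)
    else (inter, bidx)
  else (inter, bidx)
termination_by Bs.length - bidx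

def count_shapes (L : Int) (A : List (String × Int)) (B : List (String × Int)) : Int :=
  let A' := transform_A_sequence A L
  let B' := transform_B_sequence B L
  (A'.foldl (fun (st : Int × Nat × Nat) a =>
      (st.1 + 1 + ((csAdvance B' a.2 st.2.1 st.2.2).1 : Int),
       (csAdvance B' a.2 st.2.1 st.2.2).1, (csAdvance B' a.2 st.2.1 st.2.2).2))
    (1 + (B'.length : Int), 0, 0)).1

-- ===== PORT B =====
def count_shapes_alt (L : Int) (A : List (String × Int)) (B : List (String × Int)) : Int :=
  let aEntries := PySem.Set.ofList ((A.filter (fun x => x.1 == "U" || x.1 == "R")).map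
      (fun x => if x.1 == "U" then (x.1, L + x.2) else (x.1, 3 * L - x.2)))
  let bEntries := PySem.Set.ofList ((B.filter (fun x => x.1 == "L" || x.1 == "U")).map
      (fun x => if x.1 == "L" then (x.1, x.2) else (x.1, x.2 + L)))
  let crossings := (aEntries.map (fun a => ((bEntries.filter (fun b => b.2 < a.2)).length : Int))).sum
  1 + (aEntries.length : Int) + (bEntries.length : Int) + crossings

-- ===== PRECONDITION & SPEC =====
def Spec_count_shapes (L : Int) (A : List (String × Int)) (B : List (String × Int)) (out : Int) : Prop := out = count_shapes_alt L A B
instance (L : Int) (A : List (String × Int)) (B : List (String × Int)) (out : Int) : Decidable (Spec_count_shapes L A B out) := by unfold Spec_count_shapes; infer_instance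

-- ===== CLAIM (what is proved, stated in full; the proofs are below) =====
def Claim_equal_count_shapes : Prop := ∀ (L : Int) (A : List (String × Int)) (B : List (String × Int)), Dom_count_shapes L A B → Spec_count_shapes L A B (count_shapes L A B)

-- ===== LEMMAS AND PROOFS =====

-- the two-branch append loop of the transforms is a filter-then-map
theorem foldl_two_branch {α β : Type} (p1 p2 : α → Bool) (f1 f2 : α → β)
    (l : List α) (acc : List β) :
    l.foldl (fun es x => if p1 x then es ++ [f1 x] else if p2 x then es ++ [f2 x] else es) acc
      = acc ++ (l.filter (fun x => p1 x || p2 x)).map (fun x => if p1 x then f1 x else f2 x) := by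
  induction l generalizing acc with
  | nil => simp
  | cons a l ih =>
    by_cases h1 : p1 a = true
    · simp [List.foldl_cons, h1, ih]
    · by_cases h2 : p2 a = true
      · simp [List.foldl_cons, h1, h2, ih]
      · simp [List.foldl_cons, h1, h2, ih]

-- csAdvance advances both counters by the takeWhile-length of the remaining suffix
theorem csAdvance_eq (Bs : List (String × Int)) (p : Int) (inter bidx : Nat) :
    csAdvance Bs p inter bidx =
      (inter + ((Bs.drop bidx).takeWhile (fun b => decide (b.2 < p))).length,
       bidx + ((Bs.drop bidx).takeWhile (fun b => decide (b.2 < p))).length) := by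
  fun_induction csAdvance Bs p inter bidx with
  | case1 inter bidx h hp ih =>
    rw [ih, List.drop_eq_getElem_cons h]
    simp only [List.takeWhile_cons, show (decide (Bs[bidx].2 < p)) = true by simpa using hp,
      if_true, List.length_cons, Prod.mk.injEq]
    omega
  | case2 inter bidx h hp =>
    rw [List.drop_eq_getElem_cons h]
    simp [show (decide (Bs[bidx].2 < p)) = false by simpa using hp]
  | case3 inter bidx h =>
    rw [List.drop_eq_nil_iff.mpr (by omega)]
    simp

-- on a list sorted by position, countP of a downward-closed predicate is the takeWhile length
theorem countP_eq_takeWhile_length (c : Int) :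
    ∀ (l : List (String × Int)), l.Pairwise (fun x y => x.2 ≤ y.2) →
    l.countP (fun b => decide (b.2 < c)) = (l.takeWhile (fun b => decide (b.2 < c))).length := by
  intro l
  induction l with
  | nil => simp
  | cons a l ih =>
    intro hp
    rcases List.pairwise_cons.mp hp with ⟨ha, hl⟩
    by_cases h : a.2 < c
    · simp [h, ih hl]
    · simp only [List.takeWhile_cons, List.countP_cons,
        show (decide (a.2 < c)) = false by simpa using h]
      have h0 : l.countP (fun b => decide (b.2 < c)) = 0 := by
        apply List.countP_eq_zero.mpr
        intro b hb
        have := ha b hb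
        simp only [decide_eq_true_eq]
        omega
      simp [h0]

-- sum of (1 + f a) over a list
theorem sum_map_one_add {α : Type} (l : List α) (f : α → Int) :
    (l.map (fun a => 1 + f a)).sum = (l.length : Int) + (l.map f).sum := by
  induction l with
  | nil => simp
  | cons a l ih =>
    simp only [List.map_cons, List.sum_cons, ih, List.length_cons]
    push_cast
    ring

-- A's sweep over position-sorted lists computes the closed form
theorem loop_lemma (Bs : List (String × Int)) (hB : Bs.Pairwise (fun x y => x.2 ≤ y.2)) :
    ∀ (As : List (String × Int)), As.Pairwise (fun x y => x.2 ≤ y.2) →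
    ∀ (s : Int) (i : Nat), i ≤ Bs.length →
    (∀ b ∈ Bs.take i, ∀ a ∈ As, b.2 < a.2) →
    (As.foldl (fun (st : Int × Nat × Nat) a =>
        (st.1 + 1 + ((csAdvance Bs a.2 st.2.1 st.2.2).1 : Int),
         (csAdvance Bs a.2 st.2.1 st.2.2).1, (csAdvance Bs a.2 st.2.1 st.2.2).2)) (s, i, i)).1
      = s + (As.map (fun a => 1 + (Bs.countP (fun b => decide (b.2 < a.2)) : Int))).sum := by
  intro As
  induction As with
  | nil => intro _ s i _ _; simp
  | cons a As ih =>
    intro hA s i hi hinv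
    rcases List.pairwise_cons.mp hA with ⟨haA, hA'⟩
    have hcount : Bs.countP (fun b => decide (b.2 < a.2))
        = i + ((Bs.drop i).takeWhile (fun b => decide (b.2 < a.2))).length := by
      have hsplit : Bs.countP (fun b => decide (b.2 < a.2))
          = (Bs.take i).countP (fun b => decide (b.2 < a.2))
            + (Bs.drop i).countP (fun b => decide (b.2 < a.2)) := by
        conv_lhs => rw [← List.take_append_drop i Bs]
        rw [List.countP_append]
      have htake : (Bs.take i).countP (fun b => decide (b.2 < a.2)) = i := by
        rw [List.countP_eq_length.mpr (fun b hb => by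
          simpa using hinv b hb a (List.mem_cons_self))]
        simp [List.length_take]; omega
      have hdrop : (Bs.drop i).countP (fun b => decide (b.2 < a.2))
          = ((Bs.drop i).takeWhile (fun b => decide (b.2 < a.2))).length :=
        countP_eq_takeWhile_length a.2 (Bs.drop i) ((hB.sublist (List.drop_sublist i Bs)))
      omega
    have hle : i + ((Bs.drop i).takeWhile (fun b => decide (b.2 < a.2))).length ≤ Bs.length := by
      have := List.countP_le_length (p := fun b => decide (b.2 < a.2)) (l := Bs)
      omega
    have hinv' : ∀ b ∈ Bs.take (i + ((Bs.drop i).takeWhile (fun b => decide (b.2 < a.2))).length),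
        ∀ a' ∈ As, b.2 < a'.2 := by
      intro b hb a' ha'
      rw [← hcount, countP_eq_takeWhile_length a.2 Bs hB,
        ← List.prefix_iff_eq_take.mp (List.takeWhile_prefix _)] at hb
      have hba : (fun b : String × Int => decide (b.2 < a.2)) b = true :=
        List.mem_takeWhile_imp (p := fun b : String × Int => decide (b.2 < a.2)) hb
      have h2 := haA a' ha'
      simp only [decide_eq_true_eq] at hba
      omega
    simp only [List.foldl_cons]
    rw [csAdvance_eq Bs a.2 i i, ih hA' _ _ hle hinv']
    simp only [List.map_cons, List.sum_cons, hcount]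
    push_cast
    ring

-- ===== VERDICT (by name: the statement is the Claim_ definition above) =====
theorem count_shapes_spec : Claim_equal_count_shapes := by
  intro L A B _
  unfold Spec_count_shapes
  simp only [count_shapes, count_shapes_alt, transform_A_sequence, transform_B_sequence]
  rw [foldl_two_branch (fun x : String × Int => x.1 == "U") (fun x => x.1 == "R")
      (fun x => (x.1, L + x.2)) (fun x => (x.1, L + (2 * L - x.2))) A [],
    foldl_two_branch (fun x : String × Int => x.1 == "L") (fun x => x.1 == "U")
      (fun x => (x.1, x.2)) (fun x => (x.1, x.2 + L)) B []]
  have hfun : (fun x : String × Int => if x.1 == "U" then (x.1, L + x.2) else (x.1, L + (2 * L - x.2)))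
      = (fun x : String × Int => if x.1 == "U" then (x.1, L + x.2) else (x.1, 3 * L - x.2)) := by
    funext x
    split_ifs with h
    · rfl
    · exact congrArg (Prod.mk x.1) (by ring)
  rw [List.nil_append, List.nil_append, hfun]
  set aSet := PySem.Set.ofList ((A.filter (fun x => x.1 == "U" || x.1 == "R")).map
      (fun x => if x.1 == "U" then (x.1, L + x.2) else (x.1, 3 * L - x.2))) with haSet
  set bSet := PySem.Set.ofList ((B.filter (fun x => x.1 == "L" || x.1 == "U")).map
      (fun x => if x.1 == "L" then (x.1, x.2) else (x.1, x.2 + L))) with hbSet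
  have hBpair : (PySem.List.sorted bSet (fun x => x.2) false).Pairwise (fun x y => x.2 ≤ y.2) :=
    PySem.List.sorted_pairwise bSet (fun x => x.2)
  have hApair : (PySem.List.sorted aSet (fun x => x.2) false).Pairwise (fun x y => x.2 ≤ y.2) :=
    PySem.List.sorted_pairwise aSet (fun x => x.2)
  rw [loop_lemma _ hBpair _ hApair _ 0 (Nat.zero_le _) (by simp)]
  have hpA : (PySem.List.sorted aSet (fun x => x.2) false).Perm aSet :=
    PySem.List.sorted_perm aSet (fun x => x.2) false
  have hpB : (PySem.List.sorted bSet (fun x => x.2) false).Perm bSet :=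
    PySem.List.sorted_perm bSet (fun x => x.2) false
  rw [List.Perm.sum_eq (hpA.map _), PySem.List.length_sorted]
  simp only [List.Perm.countP_eq _ hpB, sum_map_one_add, ← List.countP_eq_length_filter]
  ring
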